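-- pv_equiv track=rewrite | github.com/OhMaley/AoC | 2024/Day12/solution.py | count_fences
-- ===== SOURCE A (Python) =====
-- def count_fences(perimeters, directions) -> int:
--     vis = set()
--     nb_fences = 0
--
--     for perimeter in perimeters:
--         if perimeter in vis:
--             continue
--         nb_fences += 1
--         r, c, ddr, ddc = perimeter
--         queue = [(r, c)]
--         vis.add((r, c, ddr, ddc))
--         for r, c in queue:
--             for dr, dc in directions:
--                 nr, nc = r + dr, c + dc
--                 if (nr, nc, ddr, ddc) in perimeters and (nr, nc, ddr, ddc) not in vis:
--                     queue.append((nr, nc))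
--                     vis.add((nr, nc, ddr, ddc))
--     return nb_fences
-- ===== SOURCE B (Python) =====
-- def count_fences(perimeters, directions) -> int:
--     # Peel off one connected component at a time: saturate from an arbitrary
--     # segment over the remaining segments, remove the component, count it.
--     remaining = set(perimeters)
--     count = 0
--     while remaining:
--         seed = next(iter(remaining))
--         comp = {seed}
--         while True:
--             grown = {s for s in remaining
--                      if s not in comp
--                      and any((s[0] + dr, s[1] + dc, s[2], s[3]) in comp
--                              for dr, dc in directions)}
--             if not grown:
--                 break
--             comp |= grown
--         remaining -= comp
--         count += 1
--     return count
-- ===== Notes on version B (the rewrite author's own statement) =====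
-- stated objective: alternative
-- what changed: Replaces the single pass with a shared visited set and a per-segment BFS queue by repeatedly peeling off one whole connected component at a time: saturate a component from an arbitrary remaining segment by rescanning the remaining segments, remove it, and count the peels.
-- outside the precondition, e.g. on count_fences({(0, 0, 0, 1), (0, 1, 0, 1)}, [(0, 1)]): A returns 1, B returns 2
import Mathlib
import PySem

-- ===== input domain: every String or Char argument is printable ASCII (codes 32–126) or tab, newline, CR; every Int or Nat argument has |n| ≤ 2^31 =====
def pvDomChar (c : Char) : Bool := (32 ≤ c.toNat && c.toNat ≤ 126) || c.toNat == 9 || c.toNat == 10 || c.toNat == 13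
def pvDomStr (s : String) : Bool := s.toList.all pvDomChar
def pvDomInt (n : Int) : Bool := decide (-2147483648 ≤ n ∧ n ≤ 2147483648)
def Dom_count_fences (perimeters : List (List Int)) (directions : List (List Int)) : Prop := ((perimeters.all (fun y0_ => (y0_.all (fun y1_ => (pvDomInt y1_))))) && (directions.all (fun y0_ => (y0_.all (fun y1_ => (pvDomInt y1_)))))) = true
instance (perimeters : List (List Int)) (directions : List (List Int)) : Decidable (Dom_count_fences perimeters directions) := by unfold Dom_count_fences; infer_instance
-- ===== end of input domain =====

-- ===== PORT A =====
-- BFS flood fill (transliteration of Source A). The Python iterates a growing queue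
-- list by index; ported as recursion on the queue with a fuel counter that only
-- makes the recursion total (fuel perimeters.length + 2 is proved sufficient
-- inside Pre_, where vis grows inside the nodup perimeters list).
def pvBfsA (perims dirs : List (List Int)) (ddr ddc : Int) :
    Nat → List (Int × Int) → List (List Int) → List (List Int)
  | 0, _, vis => vis
  | _ + 1, [], vis => vis
  | fuel + 1, (r, c) :: rest, vis =>
      let st := dirs.foldl
        (fun (st : List (Int × Int) × List (List Int)) d =>
          -- dr, dc = d : Python raises ValueError unless d has length 2 (outside Pre_);
          -- exact via pyGetD on length-2 d
          let nr := r + PySem.List.pyGetD d 0 0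
          let nc := c + PySem.List.pyGetD d 1 0
          if perims.contains [nr, nc, ddr, ddc] && !(st.2.contains [nr, nc, ddr, ddc]) then
            (st.1 ++ [(nr, nc)], PySem.Set.add st.2 [nr, nc, ddr, ddc])
          else st)
        ([], vis)
      pvBfsA perims dirs ddr ddc fuel (rest ++ st.1) st.2

def count_fences (perimeters : List (List Int)) (directions : List (List Int)) : Int :=
  (perimeters.foldl
    (fun (st : List (List Int) × Int) perimeter =>
      if st.1.contains perimeter then st
      else
        match perimeter with
        | [r, c, ddr, ddc] =>
          (pvBfsA perimeters directions ddr ddc (perimeters.length + 2)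
            [(r, c)] (PySem.Set.add st.1 perimeter),
           st.2 + 1)
        | _ => (st.1, st.2 + 1)   -- Python raises ValueError (tuple unpack) here; outside Pre_
    ) (PySem.Set.empty, 0)).2

-- ===== PORT B =====
-- Component peeling by saturation (transliteration of Source B): saturate a component
-- from the first remaining segment by rescanning the remaining segments, drop it,
-- count the peels. Fuel counters only make the loops total (each saturation round
-- adds a segment, each peel removes one).
def pvNbr (s d : List Int) : List Int :=
  [PySem.List.pyGetD s 0 0 + PySem.List.pyGetD d 0 0,
   PySem.List.pyGetD s 1 0 + PySem.List.pyGetD d 1 0,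
   PySem.List.pyGetD s 2 0, PySem.List.pyGetD s 3 0]

def pvGrow (directions remaining comp : List (List Int)) : List (List Int) :=
  remaining.filter (fun s =>
    !comp.contains s && directions.any (fun d => comp.contains (pvNbr s d)))

def pvSat (directions remaining : List (List Int)) : Nat → List (List Int) → List (List Int)
  | 0, comp => comp
  | fuel + 1, comp =>
    let grown := pvGrow directions remaining comp
    if grown.isEmpty then comp else pvSat directions remaining fuel (comp ++ grown)

def pvPeel (directions : List (List Int)) : Nat → List (List Int) → Int
  | 0, _ => 0
  | fuel + 1, remaining =>
    match remaining with
    | [] => 0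
    | seed :: _ =>
      let comp := pvSat directions remaining (remaining.length + 1) [seed]
      1 + pvPeel directions fuel (remaining.filter (fun s => !comp.contains s))

def count_fences_alt (perimeters : List (List Int)) (directions : List (List Int)) : Int :=
  pvPeel directions perimeters.length (PySem.Set.ofList perimeters)

-- ===== PRECONDITION & SPEC =====
-- Pre_ excludes: duplicate-containing perimeter lists (they do not represent any
-- Python set input); with non-empty perimeters, segments of length ≠ 4 and
-- directions of length ≠ 2 (Python A raises ValueError unpacking them); and
-- non-empty inputs whose direction list is not closed under negation, where A's
-- count depends on the hash-based iteration order of the perimeters set, an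
-- accidental value no implementation should pin down.
def Pre_count_fences (perimeters : List (List Int)) (directions : List (List Int)) : Prop :=
  perimeters.Nodup ∧ (∀ p ∈ perimeters, p.length = 4) ∧
  (perimeters = [] ∨
    ((∀ d ∈ directions, d.length = 2) ∧
     ∀ d ∈ directions, d.map (fun x => -x) ∈ directions))
instance (perimeters : List (List Int)) (directions : List (List Int)) : Decidable (Pre_count_fences perimeters directions) := by unfold Pre_count_fences; infer_instance
def pvWitness_count_fences : List (List Int) × List (List Int) :=
  ([[0, 0, 0, 1], [0, 1, 0, 1], [3, 3, 1, 0]], [[0, 1], [0, -1], [1, 0], [-1, 0]])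

def Spec_count_fences (perimeters : List (List Int)) (directions : List (List Int)) (out : Int) : Prop := out = count_fences_alt perimeters directions
instance (perimeters : List (List Int)) (directions : List (List Int)) (out : Int) : Decidable (Spec_count_fences perimeters directions out) := by unfold Spec_count_fences; infer_instance

-- ===== CLAIM (what is proved, stated in full; the proofs are below) =====
def Claim_equal_count_fences : Prop := ∀ (perimeters : List (List Int)) (directions : List (List Int)), Dom_count_fences perimeters directions → Pre_count_fences perimeters directions → Spec_count_fences perimeters directions (count_fences perimeters directions)

-- ===== LEMMAS AND PROOFS =====

-- Adjacency: v is a direction-neighbour of u.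
def pvAdj (dirs : List (List Int)) (u v : List Int) : Prop :=
  ∃ d ∈ dirs, v = pvNbr u d

-- One reachability step inside the segment list P.
def pvStep (P dirs : List (List Int)) (u v : List Int) : Prop :=
  v ∈ P ∧ pvAdj dirs u v

def pvReach (P dirs : List (List Int)) (p x : List Int) : Prop :=
  Relation.ReflTransGen (pvStep P dirs) p x

-- vis is closed under adjacency inside P.
def pvClosed (P dirs vis : List (List Int)) : Prop :=
  ∀ u ∈ vis, ∀ v ∈ P, pvAdj dirs u v → v ∈ vis

-- the loop body of A's outer for-loop, and of A's inner fold over directions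
def pvStepA (P dirs : List (List Int)) :
    (List (List Int) × Int) → List Int → (List (List Int) × Int) :=
  fun st perimeter =>
    if st.1.contains perimeter then st
    else
      match perimeter with
      | [r, c, ddr, ddc] =>
        (pvBfsA P dirs ddr ddc (P.length + 2) [(r, c)] (PySem.Set.add st.1 perimeter),
         st.2 + 1)
      | _ => (st.1, st.2 + 1)

def pvFoldF (P : List (List Int)) (r c ddr ddc : Int) :
    (List (Int × Int) × List (List Int)) → List Int → (List (Int × Int) × List (List Int)) :=
  fun st d =>
    let nr := r + PySem.List.pyGetD d 0 0
    let nc := c + PySem.List.pyGetD d 1 0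
    if P.contains [nr, nc, ddr, ddc] && !(st.2.contains [nr, nc, ddr, ddc]) then
      (st.1 ++ [(nr, nc)], PySem.Set.add st.2 [nr, nc, ddr, ddc])
    else st

lemma pv_count_fences_eq (P dirs : List (List Int)) :
    count_fences P dirs = (P.foldl (pvStepA P dirs) (PySem.Set.empty, 0)).2 := rfl

lemma pv_bfs_cons (P dirs : List (List Int)) (ddr ddc r c : Int) (fuel : Nat)
    (rest : List (Int × Int)) (vis : List (List Int)) :
    pvBfsA P dirs ddr ddc (fuel + 1) ((r, c) :: rest) vis =
      pvBfsA P dirs ddr ddc fuel (rest ++ (dirs.foldl (pvFoldF P r c ddr ddc) ([], vis)).1)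
        (dirs.foldl (pvFoldF P r c ddr ddc) ([], vis)).2 := rfl

lemma pv_not_contains (l : List (List Int)) (x : List Int) : ((!l.contains x) = true) ↔ x ∉ l := by
  simp

lemma pv_mem_filter (P vis : List (List Int)) (x : List Int) :
    x ∈ P.filter (fun y => !vis.contains y) ↔ x ∈ P ∧ x ∉ vis := by
  simp [List.mem_filter]

lemma pv_len4 (l : List Int) (h : l.length = 4) : ∃ a b c d, l = [a, b, c, d] := by
  match l, h with
  | [a, b, c, d], _ => exact ⟨a, b, c, d, rfl⟩

lemma pv_len2 (l : List Int) (h : l.length = 2) : ∃ a b, l = [a, b] := by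
  match l, h with
  | [a, b], _ => exact ⟨a, b, rfl⟩

lemma pv_add_eq (vis : List (List Int)) (x : List Int) (h : x ∉ vis) :
    PySem.Set.add vis x = vis ++ [x] := by
  simp [PySem.Set.add, List.contains_iff_mem, h]

lemma pv_adj_symm (dirs : List (List Int))
    (HD : ∀ d ∈ dirs, d.length = 2) (Hsym : ∀ d ∈ dirs, d.map (fun x => -x) ∈ dirs)
    (u v : List Int) (hu : u.length = 4) (h : pvAdj dirs u v) : pvAdj dirs v u := by
  obtain ⟨d, hd, rfl⟩ := h
  obtain ⟨r, c, a, b, rfl⟩ := pv_len4 u hu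
  obtain ⟨d0, d1, rfl⟩ := pv_len2 d (HD d hd)
  refine ⟨[d0, d1].map (fun x => -x), Hsym _ hd, ?_⟩
  show [r, c, a, b] = [r + d0 + -d0, c + d1 + -d1, a, b]
  simp

lemma pv_adj_cons (d : List Int) (ds : List (List Int)) (u x : List Int) :
    pvAdj (d :: ds) u x ↔ x = pvNbr u d ∨ pvAdj ds u x := by
  simp [pvAdj]

lemma pv_reach_mem (P dirs : List (List Int)) (p x : List Int) (hp : p ∈ P)
    (h : pvReach P dirs p x) : x ∈ P := by
  induction h with
  | refl => exact hp
  | tail _ hstep _ => exact hstep.1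

lemma pv_reach_avoid (P dirs vis : List (List Int)) (p : List Int)
    (H4 : ∀ q ∈ P, q.length = 4)
    (HD : ∀ d ∈ dirs, d.length = 2) (Hsym : ∀ d ∈ dirs, d.map (fun x => -x) ∈ dirs)
    (HC : pvClosed P dirs vis) (hp : p ∈ P) (hpv : p ∉ vis) :
    ∀ x, pvReach P dirs p x → x ∉ vis := by
  intro x h
  induction h with
  | refl => exact hpv
  | @tail u w hru hstep ih =>
    intro hwv
    have huP : u ∈ P := pv_reach_mem P dirs p u hp hru
    have hadj : pvAdj dirs w u :=
      pv_adj_symm dirs HD Hsym u w (H4 u huP) hstep.2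
    exact ih (HC w hwv u huP hadj)

lemma pv_filter_mono (p q : List Int → Bool) (l : List (List Int))
    (h : ∀ x ∈ l, p x = true → q x = true) :
    (l.filter p).length ≤ (l.filter q).length := by
  induction l with
  | nil => simp
  | cons a t ih =>
    have ht : (t.filter p).length ≤ (t.filter q).length :=
      ih (fun x hx => h x (List.mem_cons_of_mem a hx))
    by_cases hp : p a = true
    · have hq := h a (List.mem_cons_self) hp
      simp [hp, hq]; omega
    · simp only [List.filter_cons]
      rw [if_neg hp]
      by_cases hq : q a = true
      · rw [if_pos hq]; simp only [List.length_cons]; omega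
      · rw [if_neg hq]; exact ht

lemma pv_measure_step (P vis : List (List Int)) (q : List Int)
    (hP : P.Nodup) (hqP : q ∈ P) (hqv : q ∉ vis) :
    (P.filter (fun x => !(vis ++ [q]).contains x)).length + 1 ≤
      (P.filter (fun x => !vis.contains x)).length := by
  induction P with
  | nil => cases hqP
  | cons p t ih =>
    have hnd := List.nodup_cons.mp hP
    by_cases hpq : p = q
    · subst hpq
      have h1 : (!(vis ++ [p]).contains p) = false := by
        simp
      have h2 : (!vis.contains p) = true := by
        simp [hqv]
      simp only [List.filter_cons, h1, h2, Bool.false_eq_true, if_false, if_true]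
      have := pv_filter_mono (fun x => !(vis ++ [p]).contains x) (fun x => !vis.contains x) t
        (by intro x _ hx; simp at hx ⊢; exact hx.1)
      simp only [List.length_cons]; omega
    · have hqt : q ∈ t := by
        rcases List.mem_cons.mp hqP with h | h
        · exact absurd h.symm hpq
        · exact h
      have hih := ih hnd.2 hqt
      by_cases hpv : p ∈ vis
      · have h1 : (!(vis ++ [q]).contains p) = false := by simp [hpv]
        have h2 : (!vis.contains p) = false := by simp [hpv]
        simp only [List.filter_cons, h1, h2, Bool.false_eq_true, if_false]
        exact hih
      · have h1 : (!(vis ++ [q]).contains p) = true := by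
          simp [hpv, hpq]
        have h2 : (!vis.contains p) = true := by simp [hpv]
        simp only [List.filter_cons, h1, h2, if_true]
        simp only [List.length_cons]; omega

lemma pv_measure_drop (P vis ex : List (List Int)) (hP : P.Nodup)
    (hex : ∀ q ∈ ex, q ∈ P ∧ q ∉ vis) (hnd : (vis ++ ex).Nodup) :
    (P.filter (fun x => !(vis ++ ex).contains x)).length + ex.length ≤
      (P.filter (fun x => !vis.contains x)).length := by
  induction ex generalizing vis with
  | nil => simp
  | cons q ex' ih =>
    have hassoc : vis ++ q :: ex' = (vis ++ [q]) ++ ex' := by simp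
    have hnd' : ((vis ++ [q]) ++ ex').Nodup := by rw [← hassoc]; exact hnd
    have hqex' : q ∉ ex' := by
      have := List.Nodup.of_append_right hnd
      exact (List.nodup_cons.mp this).1
    have hex' : ∀ y ∈ ex', y ∈ P ∧ y ∉ vis ++ [q] := by
      intro y hy
      obtain ⟨hyP, hyv⟩ := hex y (List.mem_cons_of_mem q hy)
      refine ⟨hyP, ?_⟩
      simp only [List.mem_append, List.mem_singleton]
      rintro (h | rfl)
      · exact hyv h
      · exact hqex' hy
    have h1 := ih (vis ++ [q]) hex' hnd'
    obtain ⟨hqP, hqv⟩ := hex q List.mem_cons_self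
    have h2 := pv_measure_step P vis q hP hqP hqv
    rw [hassoc]
    simp only [List.length_cons]
    omega

lemma pv_foldA_spec (P : List (List Int)) (r c ddr ddc : Int) :
    ∀ (ds : List (List Int)) (acc : List (Int × Int)) (vis : List (List Int)),
      ∃ ex : List (Int × Int),
        ds.foldl (pvFoldF P r c ddr ddc) (acc, vis) =
          (acc ++ ex, vis ++ ex.map (fun pc => [pc.1, pc.2, ddr, ddc])) ∧
        (∀ pc ∈ ex, [pc.1, pc.2, ddr, ddc] ∈ P ∧ [pc.1, pc.2, ddr, ddc] ∉ vis ∧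
          pvAdj ds [r, c, ddr, ddc] [pc.1, pc.2, ddr, ddc]) ∧
        (∀ x, x ∈ vis ++ ex.map (fun pc => [pc.1, pc.2, ddr, ddc]) ↔
          x ∈ vis ∨ (x ∈ P ∧ pvAdj ds [r, c, ddr, ddc] x)) ∧
        (vis.Nodup → (vis ++ ex.map (fun pc => [pc.1, pc.2, ddr, ddc])).Nodup) := by
  intro ds
  induction ds with
  | nil =>
    intro acc vis
    refine ⟨[], by simp, by simp, ?_, by simp⟩
    intro x
    simp [pvAdj]
  | cons d ds ih =>
    intro acc vis
    have hstep : List.foldl (pvFoldF P r c ddr ddc) (acc, vis) (d :: ds) =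
        List.foldl (pvFoldF P r c ddr ddc) (pvFoldF P r c ddr ddc (acc, vis) d) ds := rfl
    set q : List Int := [r + PySem.List.pyGetD d 0 0, c + PySem.List.pyGetD d 1 0, ddr, ddc] with hq
    have hqnbr : q = pvNbr [r, c, ddr, ddc] d := rfl
    by_cases hcond : (P.contains q && !vis.contains q) = true
    · have hqP : q ∈ P := by
        have := (Bool.and_eq_true _ _).mp hcond
        exact List.contains_iff_mem.mp this.1
      have hqv : q ∉ vis := by
        have := (Bool.and_eq_true _ _).mp hcond
        simpa using this.2
      have harm : pvFoldF P r c ddr ddc (acc, vis) d =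
          (acc ++ [(r + PySem.List.pyGetD d 0 0, c + PySem.List.pyGetD d 1 0)], vis ++ [q]) := by
        simp only [pvFoldF]
        rw [if_pos hcond, pv_add_eq vis q hqv]
      obtain ⟨ex', heq, hmem, hiff, hnd⟩ :=
        ih (acc ++ [(r + PySem.List.pyGetD d 0 0, c + PySem.List.pyGetD d 1 0)]) (vis ++ [q])
      refine ⟨(r + PySem.List.pyGetD d 0 0, c + PySem.List.pyGetD d 1 0) :: ex', ?_, ?_, ?_, ?_⟩
    
      · rw [hstep, harm, heq]; simp [hq]
      · intro pc hpc
        rcases List.mem_cons.mp hpc with rfl | hpc'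
        · exact ⟨hqP, hqv, ⟨d, List.mem_cons_self, hqnbr⟩⟩
        · obtain ⟨h1, h2, h3⟩ := hmem pc hpc'
          refine ⟨h1, fun hx => h2 (by simp [hx]), ?_⟩
          obtain ⟨d', hd', he⟩ := h3
          exact ⟨d', List.mem_cons_of_mem d hd', he⟩
      · intro x
        constructor
        · intro hxin
          have hxin' : x ∈ (vis ++ [q]) ++ ex'.map (fun pc => [pc.1, pc.2, ddr, ddc]) := by
            simpa [hq] using hxin
          rcases (hiff x).mp hxin' with hv | ⟨hP', hadj⟩
          · rcases List.mem_append.mp hv with hv' | hq'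
            · exact Or.inl hv'
            · have hxq : x = q := by simpa using hq'
              subst hxq
              exact Or.inr ⟨hqP, d, List.mem_cons_self, hqnbr⟩
          · exact Or.inr ⟨hP', (pv_adj_cons d ds _ x).mpr (Or.inr hadj)⟩
        · intro hxor
          have hmain : x ∈ (vis ++ [q]) ++ ex'.map (fun pc => [pc.1, pc.2, ddr, ddc]) := by
            rcases hxor with hv | ⟨hP', hadj⟩
            · exact (hiff x).mpr (Or.inl (by simp [hv]))
            · rcases (pv_adj_cons d ds _ x).mp hadj with rfl | hadj'
              · refine (hiff _).mpr (Or.inl ?_)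
                rw [← hqnbr]
                simp
              · exact (hiff x).mpr (Or.inr ⟨hP', hadj'⟩)
          simpa [hq] using hmain
      · intro hvnd
        have hdisj : List.Disjoint vis [q] := by
          intro a ha haq
          rw [List.mem_singleton] at haq
          subst haq
          exact hqv ha
        have h1 : (vis ++ [q]).Nodup :=
          List.Nodup.append hvnd (List.nodup_singleton q) hdisj
        have h2 := hnd h1
        simpa [hq] using h2
    · have harm : pvFoldF P r c ddr ddc (acc, vis) d = (acc, vis) := by
        simp only [pvFoldF]
        rw [if_neg hcond]
      obtain ⟨ex', heq, hmem, hiff, hnd⟩ := ih acc vis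
      have hqcase : q ∉ P ∨ q ∈ vis := by
        by_contra hcon
        push_neg at hcon
        exact hcond (by
          rw [Bool.and_eq_true]
          exact ⟨List.contains_iff_mem.mpr hcon.1, (pv_not_contains vis q).mpr hcon.2⟩)
      refine ⟨ex', by rw [hstep, harm]; exact heq, ?_, ?_, hnd⟩
      · intro pc hpc
        obtain ⟨h1, h2, h3⟩ := hmem pc hpc
        obtain ⟨d', hd', he⟩ := h3
        exact ⟨h1, h2, ⟨d', List.mem_cons_of_mem d hd', he⟩⟩
      · intro x
        have hx := hiff x
        constructor
        · intro hxin
          rcases hx.mp hxin with hv | ⟨hP', hadj⟩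
          · exact Or.inl hv
          · exact Or.inr ⟨hP', (pv_adj_cons d ds _ x).mpr (Or.inr hadj)⟩
        · intro hxor
          rcases hxor with hv | ⟨hP', hadj⟩
          · exact hx.mpr (Or.inl hv)
          · rcases (pv_adj_cons d ds _ x).mp hadj with rfl | hadj'
            · rw [← hqnbr] at hP'
              rcases hqcase with h | h
              · exact absurd hP' h
              · rw [← hqnbr]; exact hx.mpr (Or.inl h)
            · exact hx.mpr (Or.inr ⟨hP', hadj'⟩)

lemma pv_bfs_spec (P dirs : List (List Int)) (ddr ddc : Int) (u0 : List Int)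
    (vis0 : List (List Int)) (HPnd : P.Nodup) :
    ∀ (fuel : Nat) (queue : List (Int × Int)) (vis : List (List Int)),
      queue.length + (P.filter (fun x => !vis.contains x)).length + 1 ≤ fuel →
      vis.Nodup →
      (∀ x ∈ vis, x ∈ P ∨ x ∈ vis0) →
      (∀ pc ∈ queue, [pc.1, pc.2, ddr, ddc] ∈ vis) →
      (∀ x ∈ vis, (∀ v ∈ P, pvAdj dirs x v → v ∈ vis) ∨
        ∃ pc ∈ queue, [pc.1, pc.2, ddr, ddc] = x) →
      (∀ pc ∈ queue, pvReach P dirs u0 [pc.1, pc.2, ddr, ddc]) →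
      (∀ x ∈ vis, x ∈ vis0 ∨ pvReach P dirs u0 x) →
      (∀ x ∈ vis, x ∈ pvBfsA P dirs ddr ddc fuel queue vis) ∧
      (pvBfsA P dirs ddr ddc fuel queue vis).Nodup ∧
      (∀ x ∈ pvBfsA P dirs ddr ddc fuel queue vis, x ∈ P ∨ x ∈ vis0) ∧
      pvClosed P dirs (pvBfsA P dirs ddr ddc fuel queue vis) ∧
      (∀ x ∈ pvBfsA P dirs ddr ddc fuel queue vis, x ∈ vis0 ∨ pvReach P dirs u0 x) := by
  intro fuel
  induction fuel with
  | zero => intro queue vis hfuel; omega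
  | succ fuel ih =>
    intro queue vis hfuel hnd hvisP hq hproc hreach hvis
    match queue with
    | [] =>
      refine ⟨fun x hx => hx, hnd, hvisP, ?_, hvis⟩
      intro u hu v hvP hadj
      rcases hproc u hu with hcl | ⟨pc, hpc, _⟩
      · exact hcl v hvP hadj
      · cases hpc
    | (r, c) :: rest =>
      rw [pv_bfs_cons]
      obtain ⟨ex, heq, hmem, hiff, hndf⟩ := pv_foldA_spec P r c ddr ddc dirs [] vis
      set exQ := ex.map (fun pc => [pc.1, pc.2, ddr, ddc]) with hexQ
      have hfst : (dirs.foldl (pvFoldF P r c ddr ddc) ([], vis)).1 = ex := by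
        rw [heq]; simp
      have hsnd : (dirs.foldl (pvFoldF P r c ddr ddc) ([], vis)).2 = vis ++ exQ := by
        rw [heq]
      rw [hfst, hsnd]
      have hu : [r, c, ddr, ddc] ∈ vis := hq (r, c) List.mem_cons_self
      have hur : pvReach P dirs u0 [r, c, ddr, ddc] := hreach (r, c) List.mem_cons_self
      have hnd' : (vis ++ exQ).Nodup := hndf hnd
      have hexprop : ∀ pc ∈ ex, [pc.1, pc.2, ddr, ddc] ∈ P ∧ [pc.1, pc.2, ddr, ddc] ∉ vis ∧
          pvAdj dirs [r, c, ddr, ddc] [pc.1, pc.2, ddr, ddc] := hmem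
      -- fuel arithmetic
      have hmeas : (P.filter (fun x => !(vis ++ exQ).contains x)).length + exQ.length ≤
          (P.filter (fun x => !vis.contains x)).length := by
        refine pv_measure_drop P vis exQ HPnd ?_ hnd'
        intro y hy
        rw [hexQ] at hy
        obtain ⟨pc, hpc, rfl⟩ := List.mem_map.mp hy
        exact ⟨(hexprop pc hpc).1, (hexprop pc hpc).2.1⟩
      have hlen : exQ.length = ex.length := by simp [hexQ]
      have hfuel' : (rest ++ ex).length +
          (P.filter (fun x => !(vis ++ exQ).contains x)).length + 1 ≤ fuel := by
        simp only [List.length_append]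
        simp only [List.length_cons] at hfuel
        omega
      refine ih (rest ++ ex) (vis ++ exQ) hfuel' hnd' ?_ ?_ ?_ ?_ ?_ |>.imp ?_ id
      -- HvisP
      · intro x hx
        rcases List.mem_append.mp hx with h | h
        · exact hvisP x h
        · rw [hexQ] at h
          obtain ⟨pc, hpc, rfl⟩ := List.mem_map.mp h
          exact Or.inl (hexprop pc hpc).1
      -- Hq
      · intro pc hpc
        rcases List.mem_append.mp hpc with h | h
        · exact List.mem_append.mpr (Or.inl (hq pc (List.mem_cons_of_mem _ h)))
        · refine List.mem_append.mpr (Or.inr ?_)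
          rw [hexQ]
          exact List.mem_map.mpr ⟨pc, h, rfl⟩
      -- Hproc
      · intro x hx
        rcases List.mem_append.mp hx with h | h
        · rcases hproc x h with hcl | ⟨pc, hpc, hpceq⟩
          · exact Or.inl (fun v hvP hadj => List.mem_append.mpr (Or.inl (hcl v hvP hadj)))
          · rcases List.mem_cons.mp hpc with rfl | hpcr
            · -- pc = (r, c): x is the popped quad, now fully expanded
              refine Or.inl ?_
              intro v hvP hadj
              rw [← hpceq] at hadj
              exact (hiff v).mpr (Or.inr ⟨hvP, hadj⟩)
            · exact Or.inr ⟨pc, List.mem_append.mpr (Or.inl hpcr), hpceq⟩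
        · rw [hexQ] at h
          obtain ⟨pc, hpc, rfl⟩ := List.mem_map.mp h
          exact Or.inr ⟨pc, List.mem_append.mpr (Or.inr hpc), rfl⟩
      -- Hreach
      · intro pc hpc
        rcases List.mem_append.mp hpc with h | h
        · exact hreach pc (List.mem_cons_of_mem _ h)
        · obtain ⟨hP', _, hadj⟩ := hexprop pc h
          exact Relation.ReflTransGen.tail hur ⟨hP', hadj⟩
      -- Hvis
      · intro x hx
        rcases List.mem_append.mp hx with h | h
        · exact hvis x h
        · rw [hexQ] at h
          obtain ⟨pc, hpc, rfl⟩ := List.mem_map.mp h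
          obtain ⟨hP', _, hadj⟩ := hexprop pc hpc
          exact Or.inr (Relation.ReflTransGen.tail hur ⟨hP', hadj⟩)
      -- lift "vis ++ exQ ⊆ out" to "vis ⊆ out"
      · intro hsub x hx
        exact hsub x (List.mem_append.mpr (Or.inl hx))

lemma pv_compA (P dirs : List (List Int)) (r c ddr ddc : Int) (vis0 : List (List Int))
    (HPnd : P.Nodup)
    (hu0P : [r, c, ddr, ddc] ∈ P) (hu0v : [r, c, ddr, ddc] ∉ vis0)
    (hnd : vis0.Nodup) (hsub : ∀ x ∈ vis0, x ∈ P) (HC : pvClosed P dirs vis0) :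
    (∀ x, x ∈ pvBfsA P dirs ddr ddc (P.length + 2) [(r, c)]
        (PySem.Set.add vis0 [r, c, ddr, ddc]) ↔
      (x ∈ vis0 ∨ pvReach P dirs [r, c, ddr, ddc] x)) ∧
    (pvBfsA P dirs ddr ddc (P.length + 2) [(r, c)]
        (PySem.Set.add vis0 [r, c, ddr, ddc])).Nodup ∧
    (∀ x ∈ pvBfsA P dirs ddr ddc (P.length + 2) [(r, c)]
        (PySem.Set.add vis0 [r, c, ddr, ddc]), x ∈ P) ∧
    pvClosed P dirs (pvBfsA P dirs ddr ddc (P.length + 2) [(r, c)]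
        (PySem.Set.add vis0 [r, c, ddr, ddc])) := by
  have hinit : PySem.Set.add vis0 [r, c, ddr, ddc] = vis0 ++ [[r, c, ddr, ddc]] :=
    pv_add_eq vis0 _ hu0v
  have hndi : (vis0 ++ [[r, c, ddr, ddc]]).Nodup := by
    refine List.Nodup.append hnd (List.nodup_singleton _) ?_
    intro a ha haq
    rw [List.mem_singleton] at haq
    subst haq
    exact hu0v ha
  obtain ⟨hmono, hout_nd, hout_P, hout_cl, hout_up⟩ :=
    pv_bfs_spec P dirs ddr ddc [r, c, ddr, ddc] vis0 HPnd (P.length + 2)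
      [(r, c)] (vis0 ++ [[r, c, ddr, ddc]])
      (by
        have := List.length_filter_le (fun x => !(vis0 ++ [[r, c, ddr, ddc]]).contains x) P
        simp only [List.length_cons, List.length_nil]
        omega)
      hndi
      (by
        intro x hx
        rcases List.mem_append.mp hx with h | h
        · exact Or.inr h
        · rw [List.mem_singleton] at h; subst h; exact Or.inl hu0P)
      (by
        intro pc hpc
        rw [List.mem_singleton] at hpc; subst hpc
        simp)
      (by
        intro x hx
        rcases List.mem_append.mp hx with h | h
        · exact Or.inl (fun v hvP hadj => List.mem_append.mpr (Or.inl (HC x h v hvP hadj)))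
        · rw [List.mem_singleton] at h; subst h
          exact Or.inr ⟨(r, c), List.mem_singleton_self _, rfl⟩)
      (by
        intro pc hpc
        rw [List.mem_singleton] at hpc; subst hpc
        exact Relation.ReflTransGen.refl)
      (by
        intro x hx
        rcases List.mem_append.mp hx with h | h
        · exact Or.inl h
        · rw [List.mem_singleton] at h; subst h
          exact Or.inr Relation.ReflTransGen.refl)
  rw [hinit]
  refine ⟨?_, hout_nd, ?_, hout_cl⟩
  · intro x
    constructor
    · exact hout_up x
    · rintro (h | h)
      · exact hmono x (List.mem_append.mpr (Or.inl h))
      · induction h with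
        | refl => exact hmono _ (List.mem_append.mpr (Or.inr (List.mem_singleton_self _)))
        | @tail b w _ hstep ihr => exact hout_cl b ihr w hstep.1 hstep.2
  · intro x hx
    rcases hout_P x hx with h | h
    · exact h
    · exact hsub x h

lemma pv_grow_mem (dirs rem comp : List (List Int)) (s : List Int) :
    s ∈ pvGrow dirs rem comp ↔ s ∈ rem ∧ s ∉ comp ∧ ∃ d ∈ dirs, pvNbr s d ∈ comp := by
  simp [pvGrow, List.mem_filter, List.any_eq_true]

lemma pv_sat_spec (P dirs rem : List (List Int)) (p : List Int)
    (H4 : ∀ q ∈ P, q.length = 4)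
    (HD : ∀ d ∈ dirs, d.length = 2) (Hsym : ∀ d ∈ dirs, d.map (fun x => -x) ∈ dirs)
    (Hrem : ∀ x ∈ rem, x ∈ P) (Hrnd : rem.Nodup) :
    ∀ (fuel : Nat) (comp : List (List Int)),
      (rem.filter (fun x => !comp.contains x)).length + 1 ≤ fuel →
      p ∈ comp →
      comp.Nodup →
      (∀ x ∈ comp, x ∈ rem) →
      (∀ x ∈ comp, pvReach P dirs p x) →
      (∀ x ∈ comp, x ∈ pvSat dirs rem fuel comp) ∧
      (pvSat dirs rem fuel comp).Nodup ∧
      (∀ x ∈ pvSat dirs rem fuel comp, x ∈ rem) ∧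
      (∀ x ∈ pvSat dirs rem fuel comp, pvReach P dirs p x) ∧
      pvGrow dirs rem (pvSat dirs rem fuel comp) = [] := by
  intro fuel
  induction fuel with
  | zero => intro comp hfuel; omega
  | succ fuel ih =>
    intro comp hfuel hp hnd hsubr hup
    by_cases hg : (pvGrow dirs rem comp).isEmpty = true
    · have hge : pvGrow dirs rem comp = [] := List.isEmpty_iff.mp hg
      have hout : pvSat dirs rem (fuel + 1) comp = comp := by
        simp [pvSat, hg]
      rw [hout]
      exact ⟨fun x hx => hx, hnd, hsubr, hup, hge⟩
    · have hout : pvSat dirs rem (fuel + 1) comp =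
          pvSat dirs rem fuel (comp ++ pvGrow dirs rem comp) := by
        simp [pvSat, hg]
      rw [hout]
      set g := pvGrow dirs rem comp with hgdef
      have hgmem : ∀ s ∈ g, s ∈ rem ∧ s ∉ comp ∧ ∃ d ∈ dirs, pvNbr s d ∈ comp := by
        intro s hs
        exact (pv_grow_mem dirs rem comp s).mp hs
      have hgnd : g.Nodup := List.Nodup.filter _ Hrnd
      have hnd' : (comp ++ g).Nodup := by
        refine List.Nodup.append hnd hgnd ?_
        intro a ha hag
        exact ((hgmem a hag).2.1) ha
      have hup' : ∀ x ∈ comp ++ g, pvReach P dirs p x := by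
        intro x hx
        rcases List.mem_append.mp hx with h | h
        · exact hup x h
        · obtain ⟨hxr, _, d, hd, hnb⟩ := hgmem x h
          have hxP : x ∈ P := Hrem x hxr
          have hadj : pvAdj dirs x (pvNbr x d) := ⟨d, hd, rfl⟩
          have hadj' : pvAdj dirs (pvNbr x d) x :=
            pv_adj_symm dirs HD Hsym x (pvNbr x d) (H4 x hxP) hadj
          exact Relation.ReflTransGen.tail (hup _ hnb) ⟨hxP, hadj'⟩
      have hsubr' : ∀ x ∈ comp ++ g, x ∈ rem := by
        intro x hx
        rcases List.mem_append.mp hx with h | h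
        · exact hsubr x h
        · exact (hgmem x h).1
      have hglen : 1 ≤ g.length := by
        rcases g with _ | ⟨a, t⟩
        · simp at hg
        · simp
      have hmeas : (rem.filter (fun x => !(comp ++ g).contains x)).length + g.length ≤
          (rem.filter (fun x => !comp.contains x)).length := by
        refine pv_measure_drop rem comp g Hrnd ?_ hnd'
        intro y hy
        exact ⟨(hgmem y hy).1, (hgmem y hy).2.1⟩
      obtain ⟨h1, h2, h3, h4, h5⟩ := ih (comp ++ g)
        (by omega)
        (List.mem_append.mpr (Or.inl hp)) hnd' hsubr' hup'
      exact ⟨fun x hx => h1 x (List.mem_append.mpr (Or.inl hx)), h2, h3, h4, h5⟩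

lemma pv_compB (P dirs vis : List (List Int)) (p : List Int)
    (H4 : ∀ q ∈ P, q.length = 4) (HPnd : P.Nodup)
    (HD : ∀ d ∈ dirs, d.length = 2) (Hsym : ∀ d ∈ dirs, d.map (fun x => -x) ∈ dirs)
    (HC : pvClosed P dirs vis) (hpP : p ∈ P) (hpv : p ∉ vis) :
    ∀ x, x ∈ pvSat dirs (P.filter (fun y => !vis.contains y))
        ((P.filter (fun y => !vis.contains y)).length + 1) [p] ↔
      pvReach P dirs p x := by
  set rem := P.filter (fun y => !vis.contains y) with hrem
  have Hrem : ∀ x ∈ rem, x ∈ P := by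
    intro x hx
    exact ((pv_mem_filter P vis x).mp hx).1
  have Hrnd : rem.Nodup := List.Nodup.filter _ HPnd
  have hprem : p ∈ rem := (pv_mem_filter P vis p).mpr ⟨hpP, hpv⟩
  obtain ⟨hsub, hnd, hsubr, hup, hge⟩ :=
    pv_sat_spec P dirs rem p H4 HD Hsym Hrem Hrnd (rem.length + 1) [p]
      (by
        have := List.length_filter_le (fun x => !([p] : List (List Int)).contains x) rem
        omega)
      (List.mem_singleton_self p) (List.nodup_singleton p)
      (by intro x hx; rw [List.mem_singleton] at hx; subst hx; exact hprem)
      (by intro x hx; rw [List.mem_singleton] at hx; subst hx; exact Relation.ReflTransGen.refl)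
  intro x
  constructor
  · exact hup x
  · intro hx
    induction hx with
    | refl => exact hsub p (List.mem_singleton_self p)
    | @tail b w hrb hstep ihr =>
      have hwv : w ∉ vis := by
        refine pv_reach_avoid P dirs vis p H4 HD Hsym HC hpP hpv w ?_
        exact Relation.ReflTransGen.tail hrb hstep
      have hwrem : w ∈ rem := (pv_mem_filter P vis w).mpr ⟨hstep.1, hwv⟩
      by_contra hwout
      have hbP : b ∈ P := pv_reach_mem P dirs p b hpP hrb
      have hadj' : pvAdj dirs w b :=
        pv_adj_symm dirs HD Hsym b w (H4 b hbP) hstep.2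
      obtain ⟨d, hd, hbeq⟩ := hadj'
      have : w ∈ pvGrow dirs rem (pvSat dirs rem (rem.length + 1) [p]) := by
        refine (pv_grow_mem _ _ _ w).mpr ⟨hwrem, hwout, d, hd, ?_⟩
        rw [← hbeq]
        exact ihr
      rw [hge] at this
      cases this

lemma pv_peel_nil (dirs : List (List Int)) (fuel : Nat) : pvPeel dirs fuel [] = 0 := by
  cases fuel <;> rfl

lemma pv_peel_cons (dirs : List (List Int)) (fuel : Nat) (seed : List Int)
    (t : List (List Int)) :
    pvPeel dirs (fuel + 1) (seed :: t) =
      1 + pvPeel dirs fuel ((seed :: t).filter (fun s =>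
        !(pvSat dirs (seed :: t) ((seed :: t).length + 1) [seed]).contains s)) := rfl

lemma pv_ofList_aux : ∀ (l acc : List (List Int)), (∀ x ∈ l, x ∉ acc) → l.Nodup →
    l.foldl PySem.Set.add acc = acc ++ l := by
  intro l
  induction l with
  | nil => intro acc _ _; simp
  | cons x t ih =>
    intro acc hdisj hnd
    have hxa : x ∉ acc := hdisj x List.mem_cons_self
    have hadd : PySem.Set.add acc x = acc ++ [x] := pv_add_eq acc x hxa
    have hnd' := List.nodup_cons.mp hnd
    rw [List.foldl_cons, hadd, ih (acc ++ [x]) ?_ hnd'.2]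
    · simp
    · intro y hy hyin
      rcases List.mem_append.mp hyin with h | h
      · exact hdisj y (List.mem_cons_of_mem x hy) h
      · rw [List.mem_singleton] at h; subst h; exact hnd'.1 hy

lemma pv_ofList_nodup (l : List (List Int)) (h : l.Nodup) : PySem.Set.ofList l = l := by
  have : PySem.Set.ofList l = l.foldl PySem.Set.add [] := rfl
  rw [this]
  simpa using pv_ofList_aux l [] (by simp) h

lemma pv_rest_head (P pre l' vis : List (List Int)) (p : List Int)
    (hP : P = pre ++ p :: l') (hpre : ∀ x ∈ pre, x ∈ vis) (hpv : p ∉ vis) :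
    P.filter (fun y => !vis.contains y) = p :: l'.filter (fun y => !vis.contains y) := by
  subst hP
  rw [List.filter_append]
  have h1 : pre.filter (fun y => !vis.contains y) = [] := by
    rw [List.filter_eq_nil_iff]
    intro a ha
    simp [hpre a ha]
  rw [h1]
  simp [List.filter_cons, hpv]

lemma pv_filter_combine (P vis comp vis1 : List (List Int))
    (h : ∀ x, x ∈ vis1 ↔ (x ∈ vis ∨ x ∈ comp)) :
    (P.filter (fun y => !vis.contains y)).filter (fun s => !comp.contains s) =
      P.filter (fun y => !vis1.contains y) := by
  rw [List.filter_filter]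
  apply List.filter_congr
  intro x _
  by_cases h1 : x ∈ vis <;> by_cases h2 : x ∈ comp <;>
    simp [h1, h2, h x]

lemma pv_outer (P dirs : List (List Int))
    (H4 : ∀ q ∈ P, q.length = 4) (HPnd : P.Nodup)
    (HD : ∀ d ∈ dirs, d.length = 2) (Hsym : ∀ d ∈ dirs, d.map (fun x => -x) ∈ dirs) :
    ∀ (l pre vis : List (List Int)) (nb : Int) (fuel : Nat),
      P = pre ++ l →
      (∀ x ∈ pre, x ∈ vis) →
      (∀ x ∈ vis, x ∈ P) →
      vis.Nodup →
      pvClosed P dirs vis →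
      (P.filter (fun y => !vis.contains y)).length ≤ fuel →
      (l.foldl (pvStepA P dirs) (vis, nb)).2 =
        nb + pvPeel dirs fuel (P.filter (fun y => !vis.contains y)) := by
  intro l
  induction l with
  | nil =>
    intro pre vis nb fuel hP hpre hsub hnd hcl hfuel
    have hrest : P.filter (fun y => !vis.contains y) = [] := by
      rw [List.filter_eq_nil_iff]
      intro a ha
      simp [hpre a (by rw [hP] at ha; simpa using ha)]
    rw [hrest, pv_peel_nil]
    simp
  | cons p l' ih =>
    intro pre vis nb fuel hP hpre hsub hnd hcl hfuel
    rw [List.foldl_cons]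
    by_cases hpv : p ∈ vis
    · have harm : pvStepA P dirs (vis, nb) p = (vis, nb) := by
        simp only [pvStepA]
        rw [if_pos (List.contains_iff_mem.mpr hpv)]
      rw [harm]
      refine ih (pre ++ [p]) vis nb fuel (by rw [hP]; simp) ?_ hsub hnd hcl hfuel
      intro x hx
      rcases List.mem_append.mp hx with h | h
      · exact hpre x h
      · rw [List.mem_singleton] at h; subst h; exact hpv
    · have hpP : p ∈ P := by rw [hP]; simp
      obtain ⟨r, c, a, b, rfl⟩ := pv_len4 p (H4 p hpP)
      have harm : pvStepA P dirs (vis, nb) [r, c, a, b] =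
          (pvBfsA P dirs a b (P.length + 2) [(r, c)] (PySem.Set.add vis [r, c, a, b]),
           nb + 1) := by
        simp only [pvStepA]
        rw [if_neg (by simpa using hpv)]
      rw [harm]
      obtain ⟨hiffA, hnd1, hsub1, hcl1⟩ :=
        pv_compA P dirs r c a b vis HPnd hpP hpv hnd hsub hcl
      have hrest : P.filter (fun y => !vis.contains y) =
          [r, c, a, b] :: l'.filter (fun y => !vis.contains y) :=
        pv_rest_head P pre l' vis [r, c, a, b] hP hpre hpv
      have hcompB := pv_compB P dirs vis [r, c, a, b] H4 HPnd HD Hsym hcl hpP hpv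
      have hfpos : 1 ≤ fuel := by
        rw [hrest] at hfuel
        simp only [List.length_cons] at hfuel
        omega
      obtain ⟨fuel', rfl⟩ : ∃ f', fuel = f' + 1 := ⟨fuel - 1, by omega⟩
      rw [hrest, pv_peel_cons, ← hrest]
      have hiff1 : ∀ x,
          x ∈ pvBfsA P dirs a b (P.length + 2) [(r, c)] (PySem.Set.add vis [r, c, a, b]) ↔
          (x ∈ vis ∨ x ∈ pvSat dirs (P.filter (fun y => !vis.contains y))
            ((P.filter (fun y => !vis.contains y)).length + 1) [[r, c, a, b]]) := by
        intro x
        constructor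
        · intro hx
          rcases (hiffA x).mp hx with h | h
          · exact Or.inl h
          · exact Or.inr ((hcompB x).mpr h)
        · rintro (h | h)
          · exact (hiffA x).mpr (Or.inl h)
          · exact (hiffA x).mpr (Or.inr ((hcompB x).mp h))
      have hfe : (P.filter (fun y => !vis.contains y)).filter (fun s =>
            !(pvSat dirs (P.filter (fun y => !vis.contains y))
              ((P.filter (fun y => !vis.contains y)).length + 1)
              [[r, c, a, b]]).contains s) =
          P.filter (fun y =>
            !(pvBfsA P dirs a b (P.length + 2) [(r, c)]
              (PySem.Set.add vis [r, c, a, b])).contains y) :=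
        pv_filter_combine P vis _ _ hiff1
      have hhead : [r, c, a, b] ∈ pvSat dirs (P.filter (fun y => !vis.contains y))
          ((P.filter (fun y => !vis.contains y)).length + 1) [[r, c, a, b]] :=
        (hcompB _).mpr Relation.ReflTransGen.refl
      have hflen : (P.filter (fun y =>
          !(pvBfsA P dirs a b (P.length + 2) [(r, c)]
            (PySem.Set.add vis [r, c, a, b])).contains y)).length ≤ fuel' := by
        rw [← hfe]
        have hsplit := congrArg (List.filter (fun s =>
          !(pvSat dirs (P.filter (fun y => !vis.contains y))
            ((P.filter (fun y => !vis.contains y)).length + 1)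
            [[r, c, a, b]]).contains s)) hrest
        rw [hsplit, List.filter_cons]
        rw [if_neg (by simpa using hhead)]
        have h1 := List.length_filter_le (fun s =>
          !(pvSat dirs (P.filter (fun y => !vis.contains y))
            ((P.filter (fun y => !vis.contains y)).length + 1)
            [[r, c, a, b]]).contains s) (l'.filter (fun y => !vis.contains y))
        rw [hrest] at hfuel
        simp only [List.length_cons] at hfuel
        omega
      have hIH := ih (pre ++ [[r, c, a, b]])
        (pvBfsA P dirs a b (P.length + 2) [(r, c)] (PySem.Set.add vis [r, c, a, b]))
        (nb + 1) fuel'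
        (by rw [hP]; simp)
        (by
          intro x hx
          rcases List.mem_append.mp hx with h | h
          · exact (hiffA x).mpr (Or.inl (hpre x h))
          · rw [List.mem_singleton] at h; subst h
            exact (hiffA _).mpr (Or.inr Relation.ReflTransGen.refl))
        hsub1 hnd1 hcl1 hflen
      rw [hIH, hfe]
      omega

-- ===== VERDICT (by name: the statement is the Claim_ definition above) =====
theorem count_fences_spec : Claim_equal_count_fences := by
  intro P dirs _ hpre
  unfold Spec_count_fences
  obtain ⟨HPnd, H4, hcase⟩ := hpre
  rcases hcase with rfl | ⟨HD, Hsym⟩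
  · rfl
  · have hfilter : P.filter (fun y => !List.contains PySem.Set.empty y) = P := by
      apply List.filter_eq_self.mpr
      intro a _
      simp [PySem.Set.empty]
    have houter := pv_outer P dirs H4 HPnd HD Hsym P [] PySem.Set.empty 0 P.length
      (by simp)
      (by intro x hx; cases hx)
      (by intro x hx; cases hx)
      List.nodup_nil
      (by intro u hu; cases hu)
      (by rw [hfilter])
    have hA : count_fences P dirs = (P.foldl (pvStepA P dirs) (PySem.Set.empty, 0)).2 :=
      pv_count_fences_eq P dirs
    rw [hA, houter, hfilter]
    show 0 + pvPeel dirs P.length P = pvPeel dirs P.length (PySem.Set.ofList P)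
    rw [pv_ofList_nodup P HPnd]
    omega
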